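-- pv_equiv track=rewrite | github.com/HaimiRich99/datapizza-ai-modded | hackapizza/market_agent.py | compute_missing
-- ===== SOURCE A (Python) =====
-- def compute_missing(
--     target_recipes: list[dict],
--     inventory: dict[str, int],
--     copies_target: int = 1,
-- ) -> dict[str, int]:
--     """
--     Calcola gli ingredienti mancanti per fare copies_target copie
--     di ciascuna ricetta target.
--     """
--     missing: dict[str, int] = {}
--     for recipe in target_recipes:
--         for ing, qty_per_copy in recipe.get("ingredients", {}).items():
--             total_needed = qty_per_copy * copies_target
--             have = inventory.get(ing, 0)
--             if have < total_needed:
--                 missing[ing] = max(missing.get(ing, 0), total_needed - have)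
--     return missing
-- ===== SOURCE B (Python) =====
-- def compute_missing(
--     target_recipes: list[dict],
--     inventory: dict[str, int],
--     copies_target: int = 1,
-- ) -> dict[str, int]:
--     # Flatten every occurrence into its positive shortfall, pick the key order
--     # with dict.fromkeys, and compute each final value by an independent max
--     # scan over the occurrence list (no incremental max-update accumulator).
--     shortfalls = [
--         (ing, qty * copies_target - inventory.get(ing, 0))
--         for recipe in target_recipes
--         for ing, qty in recipe.get("ingredients", {}).items()
--         if inventory.get(ing, 0) < qty * copies_target
--     ]
--     order = list(dict.fromkeys(ing for ing, _ in shortfalls))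
--     return {ing: max(s for i, s in shortfalls if i == ing) for ing in order}
-- ===== Notes on version B (the rewrite author's own statement) =====
-- stated objective: alternative
-- what changed: B replaces A's incremental max-update dict with grouping: it flattens all positive shortfall occurrences, takes the key order via dict.fromkeys, and computes each final value by an independent max() scan over the occurrence list (O(n*k) scans instead of A's O(n) hash accumulation).
import Mathlib
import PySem

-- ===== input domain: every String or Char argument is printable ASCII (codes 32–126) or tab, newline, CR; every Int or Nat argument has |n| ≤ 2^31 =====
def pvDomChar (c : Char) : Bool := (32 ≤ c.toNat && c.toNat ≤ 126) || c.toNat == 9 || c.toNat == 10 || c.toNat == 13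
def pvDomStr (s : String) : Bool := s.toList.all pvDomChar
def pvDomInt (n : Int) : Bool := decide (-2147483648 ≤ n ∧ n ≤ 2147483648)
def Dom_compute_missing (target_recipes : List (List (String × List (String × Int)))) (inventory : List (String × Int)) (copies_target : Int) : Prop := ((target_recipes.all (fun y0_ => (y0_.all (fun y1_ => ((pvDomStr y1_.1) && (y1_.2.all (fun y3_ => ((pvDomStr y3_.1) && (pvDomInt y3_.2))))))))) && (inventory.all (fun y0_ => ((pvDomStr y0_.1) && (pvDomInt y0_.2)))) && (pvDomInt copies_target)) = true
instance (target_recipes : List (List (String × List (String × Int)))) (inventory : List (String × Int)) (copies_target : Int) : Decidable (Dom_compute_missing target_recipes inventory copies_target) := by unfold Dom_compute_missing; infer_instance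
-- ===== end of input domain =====

-- B groups shortfall occurrences (dict.fromkeys order + independent per-key max scans) instead of A's incremental max-update dict; alternative algorithm, return values proved equal.


-- ===== PORT A =====
def compute_missing (target_recipes : List (List (String × List (String × Int)))) (inventory : List (String × Int)) (copies_target : Int) : List (String × Int) :=
  (target_recipes.foldl (fun (missing : PySem.Dict String Int) recipe =>
      ((PySem.Dict.mk recipe).getD "ingredients" []).foldl (fun m p =>
        let total_needed := p.2 * copies_target
        let hv := (PySem.Dict.mk inventory).getD p.1 0
        if hv < total_needed then
          m.insert p.1 (max (m.getD p.1 0) (total_needed - hv))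
        else m) missing)
    PySem.Dict.empty).items

-- ===== PORT B =====
-- Python's max(...) in the dict comprehension only runs with ing ∈ order, so its
-- generator is nonempty; the [] branch of the match is unreachable.
def compute_missing_alt (target_recipes : List (List (String × List (String × Int)))) (inventory : List (String × Int)) (copies_target : Int) : List (String × Int) :=
  let shortfalls := target_recipes.flatMap (fun recipe =>
    (((PySem.Dict.mk recipe).getD "ingredients" []).filter
        (fun p => decide ((PySem.Dict.mk inventory).getD p.1 0 < p.2 * copies_target))).map
      (fun p => (p.1, p.2 * copies_target - (PySem.Dict.mk inventory).getD p.1 0)))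
  let order := PySem.List.dedup (shortfalls.map (·.1))
  (order.foldl (fun (d : PySem.Dict String Int) ing =>
      d.insert ing (match (shortfalls.filter (fun p => p.1 == ing)).map (·.2) with
        | [] => 0
        | v :: t => t.foldl max v)) PySem.Dict.empty).items

-- ===== PRECONDITION & SPEC =====
def Spec_compute_missing (target_recipes : List (List (String × List (String × Int)))) (inventory : List (String × Int)) (copies_target : Int) (out : List (String × Int)) : Prop := out = compute_missing_alt target_recipes inventory copies_target
instance (target_recipes : List (List (String × List (String × Int)))) (inventory : List (String × Int)) (copies_target : Int) (out : List (String × Int)) : Decidable (Spec_compute_missing target_recipes inventory copies_target out) := by unfold Spec_compute_missing; infer_instance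

-- ===== CLAIM (what is proved, stated in full; the proofs are below) =====
def Claim_equal_compute_missing : Prop := ∀ (target_recipes : List (List (String × List (String × Int)))) (inventory : List (String × Int)) (copies_target : Int), Dom_compute_missing target_recipes inventory copies_target → Spec_compute_missing target_recipes inventory copies_target (compute_missing target_recipes inventory copies_target)

-- ===== LEMMAS AND PROOFS =====

-- A's inner loop over one recipe's ingredients equals a fold of max-inserts
-- over that recipe's filtered, mapped shortfall list.
theorem cm_inner_eq (inventory : List (String × Int)) (c : Int)
    (ings : List (String × Int)) (m : PySem.Dict String Int) :
    ings.foldl (fun m p =>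
        let total_needed := p.2 * c
        let hv := (PySem.Dict.mk inventory).getD p.1 0
        if hv < total_needed then
          m.insert p.1 (max (m.getD p.1 0) (total_needed - hv))
        else m) m
    = ((ings.filter
          (fun p => decide ((PySem.Dict.mk inventory).getD p.1 0 < p.2 * c))).map
        (fun p => (p.1, p.2 * c - (PySem.Dict.mk inventory).getD p.1 0))).foldl
        (fun m p => m.insert p.1 (max (m.getD p.1 0) p.2)) m := by
  induction ings generalizing m with
  | nil => rfl
  | cons p rest ih =>
    simp only [List.foldl_cons, List.filter_cons]
    by_cases h : (PySem.Dict.mk inventory).getD p.1 0 < p.2 * c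
    · simp only [h, decide_true]; exact ih _
    · simp only [h, decide_false]; exact ih _

-- A's whole double loop is the max-insert fold over the flattened shortfall list.
theorem cm_dict_eq (target_recipes : List (List (String × List (String × Int))))
    (inventory : List (String × Int)) (c : Int) (m : PySem.Dict String Int) :
    target_recipes.foldl (fun (missing : PySem.Dict String Int) recipe =>
      ((PySem.Dict.mk recipe).getD "ingredients" []).foldl (fun m p =>
        let total_needed := p.2 * c
        let hv := (PySem.Dict.mk inventory).getD p.1 0
        if hv < total_needed then
          m.insert p.1 (max (m.getD p.1 0) (total_needed - hv))
        else m) missing) m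
    = (target_recipes.flatMap (fun recipe =>
        (((PySem.Dict.mk recipe).getD "ingredients" []).filter
            (fun p => decide ((PySem.Dict.mk inventory).getD p.1 0 < p.2 * c))).map
          (fun p => (p.1, p.2 * c - (PySem.Dict.mk inventory).getD p.1 0)))).foldl
        (fun m p => m.insert p.1 (max (m.getD p.1 0) p.2)) m := by
  induction target_recipes generalizing m with
  | nil => rfl
  | cons r rest ih =>
    simp only [List.foldl_cons, List.flatMap_cons, List.foldl_append]
    rw [cm_inner_eq]; exact ih _

-- getD after the max-insert fold: the running max of k's values in L.
theorem cm_getD_fold (L : List (String × Int)) (d : PySem.Dict String Int) (k : String) :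
    (L.foldl (fun m p => m.insert p.1 (max (m.getD p.1 0) p.2)) d).getD k 0
    = ((L.filter (fun p => p.1 == k)).map (·.2)).foldl max (d.getD k 0) := by
  induction L generalizing d with
  | nil => rfl
  | cons p rest ih =>
    simp only [List.foldl_cons]
    by_cases h : p.1 = k
    · subst h
      rw [List.filter_cons_of_pos (by simp), List.map_cons, List.foldl_cons, ih,
        PySem.Dict.getD_insert_self]
    · rw [List.filter_cons_of_neg (by simp [h]), ih,
        PySem.Dict.getD_insert_of_ne _ _ _ (Ne.symm h)]

-- every shortfall value is positive
theorem cm_shortfall_pos (target_recipes : List (List (String × List (String × Int))))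
    (inventory : List (String × Int)) (c : Int) (p : String × Int)
    (hp : p ∈ target_recipes.flatMap (fun recipe =>
        (((PySem.Dict.mk recipe).getD "ingredients" []).filter
            (fun q => decide ((PySem.Dict.mk inventory).getD q.1 0 < q.2 * c))).map
          (fun q => (q.1, q.2 * c - (PySem.Dict.mk inventory).getD q.1 0)))) :
    0 < p.2 := by
  simp only [List.mem_flatMap, List.mem_map, List.mem_filter, decide_eq_true_eq] at hp
  obtain ⟨r, _, q, ⟨_, hlt⟩, hq⟩ := hp
  subst hq; simpa using hlt

-- ===== VERDICT (by name: the statement is the Claim_ definition above) =====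
theorem compute_missing_spec : Claim_equal_compute_missing := by
  intro trs inv c _
  unfold Spec_compute_missing compute_missing compute_missing_alt
  rw [cm_dict_eq]
  set L := trs.flatMap (fun recipe =>
    (((PySem.Dict.mk recipe).getD "ingredients" []).filter
        (fun p => decide ((PySem.Dict.mk inv).getD p.1 0 < p.2 * c))).map
      (fun p => (p.1, p.2 * c - (PySem.Dict.mk inv).getD p.1 0))) with hL
  -- A side: items of the max-insert fold as a map over its (deduped) keys
  have hnd : (L.foldl (fun m p => m.insert p.1 (max (m.getD p.1 0) p.2))
      PySem.Dict.empty).keys.Nodup := by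
    exact PySem.Dict.nodup_keys_foldl_insert_key L Prod.fst _ _ PySem.Dict.nodup_keys_empty
  have hkeys : (L.foldl (fun m p => m.insert p.1 (max (m.getD p.1 0) p.2))
      PySem.Dict.empty).keys = PySem.List.dedup (L.map (·.1)) := by
    rw [PySem.Dict.keys_foldl_insert_key]
    simp [PySem.Dict.keys_empty, PySem.List.dedup_eq_ofList, PySem.Set.ofList_eq_foldl,
      PySem.Set.update]
  rw [PySem.Dict.items_eq_map_keys _ hnd 0, hkeys]
  -- B side: the fresh-key fold appends exactly order.map …
  have hfresh : ((PySem.List.dedup (L.map (·.1))).foldl (fun (d : PySem.Dict String Int) ing =>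
      d.insert ing (match (L.filter (fun p => p.1 == ing)).map (·.2) with
        | [] => 0
        | v :: t => t.foldl max v)) PySem.Dict.empty).items
      = (PySem.List.dedup (L.map (·.1))).map (fun ing => (ing,
          match (L.filter (fun p => p.1 == ing)).map (·.2) with
          | [] => 0
          | v :: t => t.foldl max v)) := by
    rw [PySem.Dict.items_foldl_insert_fresh _ (fun x => x) _ _
      (fun a _ => PySem.Dict.contains_empty a)
      (by simp)]
    rfl
  rw [hfresh]
  apply List.map_congr_left
  intro k hk
  rw [cm_getD_fold, PySem.Dict.getD_empty]
  -- k occurs in L, so the filtered value list is nonempty and all-positive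
  have hkL : k ∈ L.map (·.1) := (PySem.List.mem_dedup _ _).mp hk
  obtain ⟨p0, hp0, hp0k⟩ := List.mem_map.mp hkL
  have hne : (L.filter (fun p => p.1 == k)).map (·.2) ≠ [] := by
    have : p0 ∈ L.filter (fun p => p.1 == k) := by
      rw [List.mem_filter]; exact ⟨hp0, by simp [hp0k]⟩
    intro h
    rcases List.map_eq_nil_iff.mp h with h'
    simp [h'] at this
  cases hvs : (L.filter (fun p => p.1 == k)).map (·.2) with
  | nil => exact absurd hvs hne
  | cons v t =>
    have hvpos : 0 < v := by
      have hv : v ∈ (L.filter (fun p => p.1 == k)).map (·.2) := by rw [hvs]; exact List.mem_cons_self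
      obtain ⟨q, hq, hq2⟩ := List.mem_map.mp hv
      have hqL : q ∈ L := (List.mem_filter.mp hq).1
      have := cm_shortfall_pos trs inv c q (hL ▸ hqL)
      omega
    simp only [List.foldl_cons]
    rw [show max (0 : Int) v = v from by omega]
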